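-- pv_equiv track=rewrite | github.com/contemptx/usenetsync | indent_repair_system.py | is_continuation_line
-- ===== SOURCE A (Python) =====
-- def is_continuation_line(line: str, stripped: str) -> bool:
--     """Check if this is a continuation line"""
--     continuation_indicators = [
--         '+', '-', '*', '/', '//', '%', '**', '<<', '>>', '&', '|', '^',
--         'and', 'or', 'not', 'in', 'is', '==', '!=', '<', '>', '<=', '>=',
--         '.', ',', '(', '[', '{'
--     ]
--
--     # Check if line starts with continuation operator
--     for indicator in continuation_indicators:
--         if stripped.startswith(indicator):
--             return True
--
--     return False
-- ===== SOURCE B (Python) =====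
-- def is_continuation_line(line: str, stripped: str) -> bool:
--     """Check if this is a continuation line"""
--     # Hand-rolled decision tree (trie) over the first characters of `stripped`,
--     # instead of scanning a token list with startswith.
--     if not stripped:
--         return False
--     c = stripped[0]
--     if c in '+-*/%<>&|^.,([{':
--         return True
--     if c == '=' or c == '!':
--         return stripped[1:2] == '='
--     if c == 'a':
--         return stripped[1:3] == 'nd'
--     if c == 'o':
--         return stripped[1:2] == 'r'
--     if c == 'n':
--         return stripped[1:3] == 'ot'
--     if c == 'i':
--         return stripped[1:2] in ('n', 's')
--     return False
-- ===== Notes on version B (the rewrite author's own statement) =====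
-- stated objective: alternative
-- what changed: Replaces A's 28-token startswith scan by a hand-rolled decision tree (trie) over the first characters of stripped: one branch on the first character class, then at most a two-character lookahead for '==', '!=', 'and', 'or', 'not', 'in', 'is'; no token list or startswith loop remains.
import Mathlib
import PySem

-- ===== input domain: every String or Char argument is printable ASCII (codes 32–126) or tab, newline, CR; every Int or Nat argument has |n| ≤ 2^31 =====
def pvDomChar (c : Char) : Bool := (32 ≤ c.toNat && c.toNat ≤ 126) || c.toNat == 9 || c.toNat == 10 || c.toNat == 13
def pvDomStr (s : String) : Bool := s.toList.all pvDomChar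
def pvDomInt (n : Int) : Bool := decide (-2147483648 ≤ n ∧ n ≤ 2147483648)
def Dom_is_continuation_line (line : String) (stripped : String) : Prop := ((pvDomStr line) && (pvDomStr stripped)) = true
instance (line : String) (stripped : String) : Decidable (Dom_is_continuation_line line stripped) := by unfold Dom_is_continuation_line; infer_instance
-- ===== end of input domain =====

-- B replaces A's 28-token startswith scan by a decision tree over the first characters
-- of `stripped` (one branch on the first character, then at most two lookahead
-- characters for '==', '!=' and the word operators); same return value, alternative structure.


-- ===== PORT A =====
def pvIndicators : List String :=
  ["+", "-", "*", "/", "//", "%", "**", "<<", ">>", "&", "|", "^",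
   "and", "or", "not", "in", "is", "==", "!=", "<", ">", "<=", ">=",
   ".", ",", "(", "[", "{"]

-- the 'for indicator in …: if stripped.startswith(indicator): return True' loop
def pvScan (inds : List String) (s : String) : Bool :=
  match inds with
  | [] => false
  | ind :: rest => if PySem.Str.startswith s ind then true else pvScan rest s

def is_continuation_line (line : String) (stripped : String) : Bool :=
  pvScan pvIndicators stripped

-- ===== PORT B =====
-- decision tree on the first characters of `stripped` (Source B's if-chain, step for step)
def is_continuation_line_alt (line : String) (stripped : String) : Bool :=
  match stripped.toList with
  | [] => false
  | c :: _ =>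
    if ("+-*/%<>&|^.,([{".toList).contains c then true
    else if c = '=' || c = '!' then PySem.Str.slice stripped (some 1) (some 2) == "="
    else if c = 'a' then PySem.Str.slice stripped (some 1) (some 3) == "nd"
    else if c = 'o' then PySem.Str.slice stripped (some 1) (some 2) == "r"
    else if c = 'n' then PySem.Str.slice stripped (some 1) (some 3) == "ot"
    else if c = 'i' then
      (PySem.Str.slice stripped (some 1) (some 2) == "n"
        || PySem.Str.slice stripped (some 1) (some 2) == "s")
    else false

-- ===== PRECONDITION & SPEC =====
def Spec_is_continuation_line (line : String) (stripped : String) (out : Bool) : Prop := out = is_continuation_line_alt line stripped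
instance (line : String) (stripped : String) (out : Bool) : Decidable (Spec_is_continuation_line line stripped out) := by unfold Spec_is_continuation_line; infer_instance

-- ===== CLAIM =====
def Claim_equal_is_continuation_line : Prop := ∀ (line : String) (stripped : String), Dom_is_continuation_line line stripped → Spec_is_continuation_line line stripped (is_continuation_line line stripped)

-- ===== LEMMAS AND PROOFS =====

theorem pv_slice12 (c : Char) (t : List Char) :
    PySem.Str.slice (String.ofList (c :: t)) (some 1) (some 2) = String.ofList (t.take 1) := by
  rw [← String.toList_inj]
  have : ((2:Int)) = ((1:Int) + (1:Nat)) := by norm_num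
  simp [PySem.Str.toList_slice]
  rw [show ((1:Int)) = ((1:Nat):Int) by norm_num, show ((2:Int)) = ((2:Nat):Int) by norm_num,
    PySem.List.slice_natCast]
  simp

theorem pv_slice13 (c : Char) (t : List Char) :
    PySem.Str.slice (String.ofList (c :: t)) (some 1) (some 3) = String.ofList (t.take 2) := by
  rw [← String.toList_inj]
  simp [PySem.Str.toList_slice]
  rw [show ((1:Int)) = ((1:Nat):Int) by norm_num, show ((3:Int)) = ((3:Nat):Int) by norm_num,
    PySem.List.slice_natCast]
  simp

set_option maxHeartbeats 2000000 in
theorem pv_key (cs : List Char) :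
    pvScan pvIndicators (String.ofList cs)
      = is_continuation_line_alt "" (String.ofList cs) := by
  cases cs with
  | nil => decide
  | cons c t =>
    unfold is_continuation_line_alt
    simp only [String.toList_ofList]
    rw [pv_slice12, pv_slice13]
    rcases t with _ | ⟨d, _ | ⟨e, v⟩⟩
    all_goals (
      simp [pvScan, pvIndicators, PySem.Str.startswith, PySem.Chars.startswith,
        List.isPrefixOf]
      rw [Bool.eq_iff_iff]
      simp only [Bool.or_eq_true, Bool.and_eq_true, decide_eq_true_eq]
      constructor
      · intro h
        rcases h with (h|h) <;> try rcases h with (h|h)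
        all_goals try rcases h with (h|h)
        all_goals try rcases h with (h|h)
        all_goals try rcases h with (h|h)
        all_goals try rcases h with (h|h)
        all_goals aesop
      · intro h
        try split_ifs at h with h1 h2 h3 h4 h5 h6
        all_goals (try simp [← String.toList_inj] at *)
        all_goals aesop)

-- ===== VERDICT =====
theorem is_continuation_line_spec : Claim_equal_is_continuation_line := by
  intro line stripped _
  unfold Spec_is_continuation_line is_continuation_line
  have h := pv_key stripped.toList
  simp only [String.ofList_toList] at h
  rw [h]
  unfold is_continuation_line_alt
  rfl
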